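-- pv_equiv track=rewrite | github.com/menguri/ph2-project | ph2/overcooked_v2_experiments/ppo/utils/ph1_recent_cross_eval.py | _build_run_combinations
-- ===== SOURCE A (Python) =====
-- import itertools
-- from typing import Dict, List, Optional
--
-- def _build_run_combinations(num_runs: int, num_agents: int, pairing_policy: Optional[int]) -> List[List[int]]:
--     if pairing_policy is not None:
--         if pairing_policy < 0 or pairing_policy >= num_runs:
--             raise ValueError(f"pairing_policy must be in [0, {num_runs - 1}]")
--         combos = [[pairing_policy, i] for i in range(num_runs) if i != pairing_policy]
--         combos += [[i, pairing_policy] for i in range(num_runs) if i != pairing_policy]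
--         return combos
--
--     combos = list(itertools.permutations(range(num_runs), num_agents))
--     combos = [list(c) for c in combos]
--     combos += [[i] * num_agents for i in range(num_runs)]
--     return combos
-- ===== SOURCE B (Python) =====
-- from typing import List, Optional
--
--
-- def _build_run_combinations(num_runs: int, num_agents: int, pairing_policy: Optional[int]) -> List[List[int]]:
--     if pairing_policy is not None:
--         if pairing_policy < 0 or pairing_policy >= num_runs:
--             raise ValueError(f"pairing_policy must be in [0, {num_runs - 1}]")
--         others = [i for i in range(num_runs) if i != pairing_policy]
--         return [[pairing_policy, i] for i in others] + [[i, pairing_policy] for i in others]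
--
--     result: List[List[int]] = []
--     used = [False] * num_runs
--     partial: List[int] = []
--
--     def backtrack(remaining: int) -> None:
--         if remaining == 0:
--             result.append(partial.copy())
--             return
--         for i in range(num_runs):
--             if not used[i]:
--                 used[i] = True
--                 partial.append(i)
--                 backtrack(remaining - 1)
--                 partial.pop()
--                 used[i] = False
--
--     backtrack(num_agents)
--     result.extend([i] * num_agents for i in range(num_runs))
--     return result
-- ===== Notes on version B (the rewrite author's own statement) =====
-- stated objective: alternative
-- what changed: Replaces itertools.permutations with an explicit recursive backtracking generator over a used-flag array (and builds the pairing branch from a single precomputed 'others' list), instead of materialising library permutation tuples.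
import Mathlib
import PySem

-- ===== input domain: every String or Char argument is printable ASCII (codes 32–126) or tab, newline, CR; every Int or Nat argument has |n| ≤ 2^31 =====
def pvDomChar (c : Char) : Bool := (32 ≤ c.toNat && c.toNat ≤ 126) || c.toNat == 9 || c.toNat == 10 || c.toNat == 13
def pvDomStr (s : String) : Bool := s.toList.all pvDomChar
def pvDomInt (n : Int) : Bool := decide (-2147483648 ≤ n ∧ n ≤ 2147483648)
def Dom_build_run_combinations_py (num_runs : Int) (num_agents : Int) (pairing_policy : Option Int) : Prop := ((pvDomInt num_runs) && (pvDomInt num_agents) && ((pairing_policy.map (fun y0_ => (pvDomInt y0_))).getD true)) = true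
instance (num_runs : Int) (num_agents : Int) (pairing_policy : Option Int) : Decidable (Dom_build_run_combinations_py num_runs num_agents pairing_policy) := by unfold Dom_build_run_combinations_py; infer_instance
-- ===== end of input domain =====

-- B replaces itertools.permutations by an explicit recursive backtracking generator
-- over a used-flag array (alternative algorithm, same cost).

-- ===== PORT A =====
-- itertools.permutations(range(n), k): the pool range(n) is sorted and duplicate-free,
-- so the library's output is exactly the lexicographic recursion "pick each pool element
-- in order, recurse on the pool with that element erased"; this hand port is exact for
-- distinct pools (which range(n) is).
def pyPermutations (pool : List Int) (k : Nat) : List (List Int) :=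
  match k with
  | 0 => [[]]
  | Nat.succ k' => pool.flatMap (fun x => (pyPermutations (pool.erase x) k').map (fun p => x :: p))

def build_run_combinations_py (num_runs : Int) (num_agents : Int) (pairing_policy : Option Int) : List (List Int) :=
  match pairing_policy with
  | some p =>
      -- the `raise ValueError` branch (p < 0 ∨ p ≥ num_runs) is excluded by Pre_
      ((PySem.List.pyRange 0 num_runs 1).filter (fun i => i ≠ p)).map (fun i => [p, i])
        ++ ((PySem.List.pyRange 0 num_runs 1).filter (fun i => i ≠ p)).map (fun i => [i, p])
  | none =>
      -- `itertools.permutations` raises on num_agents < 0; excluded by Pre_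
      (pyPermutations (PySem.List.pyRange 0 num_runs 1) num_agents.toNat)
        ++ (PySem.List.pyRange 0 num_runs 1).map (fun i => List.replicate num_agents.toNat i)

-- ===== PORT B =====
-- backtrack: recursive generator over a used-flag array; `rem` counts how many slots remain
def backtrackB (n : Nat) (rem : Nat) (used : List Bool) (part : List Int) : List (List Int) :=
  match rem with
  | 0 => [part]
  | Nat.succ r =>
      (List.range n).flatMap (fun i =>
        if used.getD i false then []
        else backtrackB n r (used.set i true) (part ++ [(i : Int)]))

def build_run_combinations_py_alt (num_runs : Int) (num_agents : Int) (pairing_policy : Option Int) : List (List Int) :=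
  match pairing_policy with
  | some p =>
      let others := (PySem.List.pyRange 0 num_runs 1).filter (fun i => i ≠ p)
      others.map (fun i => [p, i]) ++ others.map (fun i => [i, p])
  | none =>
      backtrackB num_runs.toNat num_agents.toNat (List.replicate num_runs.toNat false) []
        ++ (PySem.List.pyRange 0 num_runs 1).map (fun i => List.replicate num_agents.toNat i)

-- ===== PRECONDITION & SPEC =====
-- A raises ValueError when pairing_policy is given but out of [0, num_runs), and when
-- pairing_policy is None with num_agents < 0 (itertools.permutations rejects negative r);
-- Pre_ excludes exactly those inputs (A raises there, so it returns no value to match).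
def Pre_build_run_combinations_py (num_runs : Int) (num_agents : Int) (pairing_policy : Option Int) : Prop :=
  match pairing_policy with
  | some p => 0 ≤ p ∧ p < num_runs
  | none => 0 ≤ num_agents

instance (num_runs : Int) (num_agents : Int) (pairing_policy : Option Int) : Decidable (Pre_build_run_combinations_py num_runs num_agents pairing_policy) := by
  unfold Pre_build_run_combinations_py; cases pairing_policy <;> infer_instance

def pvWitness_build_run_combinations_py : Int × Int × Option Int := (3, 2, none)

def Spec_build_run_combinations_py (num_runs : Int) (num_agents : Int) (pairing_policy : Option Int) (out : List (List Int)) : Prop := out = build_run_combinations_py_alt num_runs num_agents pairing_policy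
instance (num_runs : Int) (num_agents : Int) (pairing_policy : Option Int) (out : List (List Int)) : Decidable (Spec_build_run_combinations_py num_runs num_agents pairing_policy out) := by unfold Spec_build_run_combinations_py; infer_instance

-- ===== CLAIM (what is proved, stated in full; the proofs are below) =====
def Claim_equal_build_run_combinations_py : Prop := ∀ (num_runs : Int) (num_agents : Int) (pairing_policy : Option Int), Dom_build_run_combinations_py num_runs num_agents pairing_policy → Pre_build_run_combinations_py num_runs num_agents pairing_policy → Spec_build_run_combinations_py num_runs num_agents pairing_policy (build_run_combinations_py num_runs num_agents pairing_policy)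

-- ===== LEMMAS AND PROOFS =====

-- the elements still available under a used-mask, in increasing index order
def availL (l : List Nat) (used : List Bool) : List Int :=
  l.filterMap (fun i => if used.getD i false then none else some (i : Int))

theorem availL_nil (used : List Bool) : availL [] used = [] := rfl

theorem availL_cons (j : Nat) (t : List Nat) (used : List Bool) :
    availL (j :: t) used
      = if used.getD j false then availL t used else (j : Int) :: availL t used := by
  unfold availL
  rw [List.filterMap_cons]
  by_cases hu : used.getD j false
  · rw [if_pos hu, if_pos hu]
  · rw [if_neg hu, if_neg hu]

theorem availL_congr (l : List Nat) (u1 u2 : List Bool)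
    (h : ∀ x ∈ l, u1.getD x false = u2.getD x false) : availL l u1 = availL l u2 := by
  unfold availL
  exact List.filterMap_congr (fun x hx => by rw [h x hx])

theorem getD_set_ne (used : List Bool) (i j : Nat) (hji : j ≠ i) :
    (used.set i true).getD j false = used.getD j false := by
  simp [List.getD, List.getElem?_set_ne (fun h => hji h.symm)]

theorem availL_erase (l : List Nat) (used : List Bool) (i : Nat)
    (hnd : l.Nodup) (hi : i < used.length) :
    (availL l used).erase (i : Int) = availL l (used.set i true) := by
  induction l with
  | nil => simp [availL_nil]
  | cons j t ih =>
    have hnd' : t.Nodup := hnd.of_cons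
    by_cases hji : j = i
    · subst hji
      have hjn : j ∉ t := (List.nodup_cons.mp hnd).1
      have hcongr : availL t used = availL t (used.set j true) :=
        availL_congr t _ _ (fun x hx => (getD_set_ne used j x (fun h => hjn (h ▸ hx))).symm)
      by_cases hu : used.getD j false
      · -- j masked: absent from both sides
        rw [availL_cons, if_pos hu, availL_cons, if_pos (by simp [List.getD, List.getElem?_set_self hi]),
          ← hcongr]
        -- i = j is masked so (j:Int) ∉ availL t used would give erase = id; but we can
        -- instead note (j:Int) not in availL t used since j ∉ t
        have hnotmem : (j : Int) ∉ availL t used := by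
          intro hmem
          unfold availL at hmem
          obtain ⟨x, hx, hfx⟩ := List.mem_filterMap.mp hmem
          by_cases h : used.getD x false
          · rw [if_pos h] at hfx; cases hfx
          · rw [if_neg h] at hfx
            exact hjn ((by exact_mod_cast Option.some.inj hfx : x = j) ▸ hx)
        exact List.erase_of_not_mem hnotmem
      · -- j unmasked: erase removes the head; set drops it
        rw [availL_cons, if_neg hu, availL_cons,
          if_pos (by simp [List.getD, List.getElem?_set_self hi]), List.erase_cons_head, hcongr]
    · -- head j ≠ i : head unchanged by the set, recurse
      have hget : (used.set i true).getD j false = used.getD j false := getD_set_ne used i j hji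
      by_cases hu : used.getD j false
      · rw [availL_cons, if_pos hu, availL_cons, if_pos (hget.trans hu), ih hnd']
      · have hji' : ((j : Nat) : Int) ≠ (i : Int) := by exact_mod_cast hji
        rw [availL_cons, if_neg hu, availL_cons, if_neg (fun h => hu (hget ▸ h)),
          List.erase_cons_tail (by simpa using hji'), ih hnd']

theorem backtrackB_eq (n rem : Nat) :
    ∀ (used : List Bool) (part : List Int), used.length = n →
    backtrackB n rem used part
      = (pyPermutations (availL (List.range n) used) rem).map (fun p => part ++ p) := by
  induction rem with
  | zero => intro used part _; simp [backtrackB, pyPermutations]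
  | succ r ih =>
    intro used part hlen
    simp only [backtrackB, pyPermutations, List.map_flatMap]
    have key : ∀ (l : List Nat), l.Nodup → (∀ i ∈ l, i < n) →
        l.flatMap (fun i =>
          if used.getD i false then []
          else backtrackB n r (used.set i true) (part ++ [(i : Int)]))
        = (availL l used).flatMap (fun x =>
            (pyPermutations ((availL (List.range n) used).erase x) r).map
              (fun p => part ++ x :: p)) := by
      intro l hnd hmem
      induction l with
      | nil => simp [availL_nil]
      | cons j t ihl =>
        have hjn : j < n := hmem j (List.mem_cons_self)
        have ht : ∀ i ∈ t, i < n := fun i hi => hmem i (List.mem_cons_of_mem _ hi)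
        by_cases hu : used.getD j false
        · rw [List.flatMap_cons, availL_cons, if_pos hu, if_pos hu, List.nil_append,
            ihl hnd.of_cons ht]
        · rw [List.flatMap_cons, availL_cons, if_neg hu, if_neg hu, List.flatMap_cons,
            ihl hnd.of_cons ht,
            ih (used.set j true) (part ++ [(j : Int)]) (by simpa using hlen),
            ← availL_erase (List.range n) used j (List.nodup_range) (by omega)]
          simp
    rw [key (List.range n) List.nodup_range (fun i hi => List.mem_range.mp hi)]
    simp [List.map_map, Function.comp_def]

theorem availL_replicate_false (n : Nat) :
    availL (List.range n) (List.replicate n false) = (List.range n).map Int.ofNat := by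
  unfold availL
  rw [List.filterMap_congr (g := fun i => some (Int.ofNat i)) (fun x hx => ?_)]
  · exact congrFun (List.filterMap_eq_map (f := Int.ofNat)) _
  · have hx' : x < n := List.mem_range.mp hx
    simp [List.getD, hx']

theorem pyRange_zero_eq_map (m : Int) :
    PySem.List.pyRange 0 m 1 = (List.range m.toNat).map Int.ofNat := by
  rw [PySem.List.pyRange_one]
  norm_num [Int.ofNat_eq_natCast]

-- ===== VERDICT (by name: the statement is the Claim_ definition above) =====
theorem build_run_combinations_py_spec : Claim_equal_build_run_combinations_py := by
  intro num_runs num_agents pairing_policy _ hpre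
  unfold Spec_build_run_combinations_py
  cases pairing_policy with
  | some p => rfl
  | none =>
    unfold build_run_combinations_py build_run_combinations_py_alt
    rw [backtrackB_eq num_runs.toNat num_agents.toNat
        (List.replicate num_runs.toNat false) [] (by simp),
      availL_replicate_false, ← pyRange_zero_eq_map]
    simp
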